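-- pv_equiv track=rewrite | github.com/ShivangKathait29/codereview | server/environment.py | is_fix_relevant
-- ===== SOURCE A (Python) =====
-- def is_fix_relevant(issue: str, fix: str) -> bool:
--     """Check whether the proposed fix is relevant to the identified issue."""
--     issue = issue.lower().strip()
--     fix = fix.lower().strip()
--
--     # Crude but effective relevance checks.
--     if "overflow" in issue and "long long" in fix:
--         return True
--     if "even" in issue and "% 2 == 0" in fix:
--         return True
--
--     # Existing task-family relevance checks.
--     if (
--         "division by zero" in issue
--         or ("count" in issue and "zero" in issue)
--     ) and any(token in fix for token in ["count == 0", "if(count", "if (count", "guard", "validate", "check"]):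
--         return True
--
--     if (
--         "out-of-bounds" in issue
--         or "out of bounds" in issue
--         or "arr[i+1]" in issue
--         or "boundary" in issue
--     ) and any(token in fix for token in ["i + 1 < arr.size()", "arr.size() - 1", "bound", "index"]):
--         return True
--
--     if (
--         "empty" in issue
--         or "arr.front" in issue
--         or "arr.back" in issue
--     ) and any(token in fix for token in ["arr.empty()", "if(arr.empty())", "if (arr.empty())", "size() == 0"]):
--         return True
--
--     if (
--         "pass by value" in issue
--         or "copy" in issue
--         or "overhead" in issue
--     ) and any(token in fix for token in ["const vector<int>&", "const reference", "reference"]):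
--         return True
--
--     return False
-- ===== SOURCE B (Python) =====
-- # Two-phase rewrite: tag each side independently with the rule ids it triggers,
-- # then report whether the two tag lists share an id (no per-rule coupled tests).
-- _ISSUE_TRIGGERS = [
--     ("overflow", 0), ("even", 1), ("division by zero", 2),
--     ("out-of-bounds", 3), ("out of bounds", 3), ("arr[i+1]", 3), ("boundary", 3),
--     ("empty", 4), ("arr.front", 4), ("arr.back", 4),
--     ("pass by value", 5), ("copy", 5), ("overhead", 5),
-- ]
-- _FIX_TRIGGERS = [
--     ("long long", 0), ("% 2 == 0", 1),
--     ("count == 0", 2), ("if(count", 2), ("if (count", 2),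
--     ("guard", 2), ("validate", 2), ("check", 2),
--     ("i + 1 < arr.size()", 3), ("arr.size() - 1", 3), ("bound", 3), ("index", 3),
--     ("arr.empty()", 4), ("if(arr.empty())", 4), ("if (arr.empty())", 4), ("size() == 0", 4),
--     ("const vector<int>&", 5), ("const reference", 5), ("reference", 5),
-- ]
--
--
-- def is_fix_relevant(issue: str, fix: str) -> bool:
--     issue = issue.lower().strip()
--     fix = fix.lower().strip()
--     hit_issue = [r for s, r in _ISSUE_TRIGGERS if s in issue]
--     if "count" in issue and "zero" in issue:
--         hit_issue.append(2)
--     hit_fix = [r for t, r in _FIX_TRIGGERS if t in fix]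
--     return any(r in hit_fix for r in hit_issue)
-- ===== Notes on version B (the rewrite author's own statement) =====
-- stated objective: alternative
-- what changed: Instead of A's chain of per-rule coupled tests (issue-condition AND fix-token-scan, returning early), B tags the issue and the fix independently with the rule ids each triggers (two separate scans over flat (substring, rule-id) trigger lists, the count+zero conjunction appending its id) and returns whether the two tag lists intersect.
import Mathlib
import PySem

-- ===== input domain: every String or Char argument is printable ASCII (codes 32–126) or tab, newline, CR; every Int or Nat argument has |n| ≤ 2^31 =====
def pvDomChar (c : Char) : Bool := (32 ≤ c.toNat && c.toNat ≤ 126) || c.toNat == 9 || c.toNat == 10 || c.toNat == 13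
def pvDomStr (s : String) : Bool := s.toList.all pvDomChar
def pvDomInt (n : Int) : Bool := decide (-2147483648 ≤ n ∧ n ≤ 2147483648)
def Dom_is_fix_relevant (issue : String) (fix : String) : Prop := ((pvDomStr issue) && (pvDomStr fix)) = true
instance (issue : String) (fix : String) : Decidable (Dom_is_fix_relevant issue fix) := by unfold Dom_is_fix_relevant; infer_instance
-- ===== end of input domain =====

-- B re-decomposes A's coupled if-chain into two independent tagging passes (rule ids
-- matched by the issue, rule ids matched by the fix) intersected at the end (objective: alternative).


-- ===== PORT A =====
def is_fix_relevant (issue : String) (fix : String) : Bool :=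
  let i := PySem.Str.strip (PySem.Str.lower issue)
  let f := PySem.Str.strip (PySem.Str.lower fix)
  if PySem.Str.isIn "overflow" i && PySem.Str.isIn "long long" f then true
  else if PySem.Str.isIn "even" i && PySem.Str.isIn "% 2 == 0" f then true
  else if (PySem.Str.isIn "division by zero" i
            || (PySem.Str.isIn "count" i && PySem.Str.isIn "zero" i))
          && (["count == 0", "if(count", "if (count", "guard", "validate", "check"].any
                (fun t => PySem.Str.isIn t f)) then true
  else if (PySem.Str.isIn "out-of-bounds" i
            || PySem.Str.isIn "out of bounds" i
            || PySem.Str.isIn "arr[i+1]" i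
            || PySem.Str.isIn "boundary" i)
          && (["i + 1 < arr.size()", "arr.size() - 1", "bound", "index"].any
                (fun t => PySem.Str.isIn t f)) then true
  else if (PySem.Str.isIn "empty" i
            || PySem.Str.isIn "arr.front" i
            || PySem.Str.isIn "arr.back" i)
          && (["arr.empty()", "if(arr.empty())", "if (arr.empty())", "size() == 0"].any
                (fun t => PySem.Str.isIn t f)) then true
  else if (PySem.Str.isIn "pass by value" i
            || PySem.Str.isIn "copy" i
            || PySem.Str.isIn "overhead" i)
          && (["const vector<int>&", "const reference", "reference"].any
                (fun t => PySem.Str.isIn t f)) then true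
  else false

-- ===== PORT B =====
def pvIssueTriggers : List (String × Int) :=
  [("overflow", 0), ("even", 1), ("division by zero", 2),
   ("out-of-bounds", 3), ("out of bounds", 3), ("arr[i+1]", 3), ("boundary", 3),
   ("empty", 4), ("arr.front", 4), ("arr.back", 4),
   ("pass by value", 5), ("copy", 5), ("overhead", 5)]

def pvFixTriggers : List (String × Int) :=
  [("long long", 0), ("% 2 == 0", 1),
   ("count == 0", 2), ("if(count", 2), ("if (count", 2),
   ("guard", 2), ("validate", 2), ("check", 2),
   ("i + 1 < arr.size()", 3), ("arr.size() - 1", 3), ("bound", 3), ("index", 3),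
   ("arr.empty()", 4), ("if(arr.empty())", 4), ("if (arr.empty())", 4), ("size() == 0", 4),
   ("const vector<int>&", 5), ("const reference", 5), ("reference", 5)]

def is_fix_relevant_alt (issue : String) (fix : String) : Bool :=
  let i := PySem.Str.strip (PySem.Str.lower issue)
  let f := PySem.Str.strip (PySem.Str.lower fix)
  let hitIssue0 := (pvIssueTriggers.filter (fun p => PySem.Str.isIn p.1 i)).map Prod.snd
  let hitIssue := hitIssue0 ++ (if PySem.Str.isIn "count" i && PySem.Str.isIn "zero" i
                  then [(2 : Int)] else [])
  let hitFix := (pvFixTriggers.filter (fun p => PySem.Str.isIn p.1 f)).map Prod.snd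
  hitIssue.any (fun r => hitFix.contains r)

-- ===== PRECONDITION & SPEC =====
def Spec_is_fix_relevant (issue : String) (fix : String) (out : Bool) : Prop := out = is_fix_relevant_alt issue fix
instance (issue : String) (fix : String) (out : Bool) : Decidable (Spec_is_fix_relevant issue fix out) := by unfold Spec_is_fix_relevant; infer_instance

-- ===== CLAIM =====
def Claim_equal_is_fix_relevant : Prop := ∀ (issue : String) (fix : String), Dom_is_fix_relevant issue fix → Spec_is_fix_relevant issue fix (is_fix_relevant issue fix)

-- ===== LEMMAS AND PROOFS =====
theorem pv_ite_or (c r : Bool) : (if c then true else r) = (c || r) := by cases c <;> simp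

theorem pv_any_filter_map {α : Type} (l : List (α × Int)) (p : α × Int → Bool) (g : Int → Bool) :
    ((l.filter p).map Prod.snd).any g = l.any (fun x => p x && g x.2) := by
  induction l with
  | nil => rfl
  | cons a t ih =>
    cases hp : p a <;> simp [hp, List.any_cons, ih]

theorem pv_beq_comm (x y : Int) : (x == y) = (y == x) := by
  by_cases h : x = y
  · subst h; rfl
  · have h' : ¬ y = x := fun e => h e.symm
    simp [h, h']

theorem pv_contains_filter_map {α : Type} (l : List (α × Int)) (p : α × Int → Bool) (k : Int) :
    ((l.filter p).map Prod.snd).contains k = l.any (fun x => p x && (x.2 == k)) := by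
  induction l with
  | nil => rfl
  | cons a t ih =>
    cases hp : p a <;>
      simp only [List.filter_cons, hp, Bool.false_eq_true, if_false, if_true, List.map_cons,
        List.contains_cons, List.any_cons, Bool.false_and, Bool.false_or, Bool.true_and, ih,
        pv_beq_comm]

theorem pv_any_ite (c : Bool) (g : Int → Bool) :
    (if c then [(2 : Int)] else []).any g = (c && g 2) := by
  cases c <;> simp

-- ===== VERDICT =====
theorem is_fix_relevant_spec : Claim_equal_is_fix_relevant := by
  intro issue fix _
  unfold Spec_is_fix_relevant is_fix_relevant is_fix_relevant_alt
  simp only [pv_ite_or, List.any_append, pv_any_ite, pv_any_filter_map,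
    pv_contains_filter_map, pvIssueTriggers, pvFixTriggers, List.any_cons, List.any_nil,
    Int.reduceBEq, Bool.and_true, Bool.and_false, Bool.or_false, Bool.false_or,
    Bool.and_or_distrib_right, Bool.or_assoc, Bool.and_assoc]
  generalize PySem.Str.strip (PySem.Str.lower issue) = i
  generalize PySem.Str.strip (PySem.Str.lower fix) = f
  generalize (PySem.Str.isIn "count == 0" f || (PySem.Str.isIn "if(count" f ||
    (PySem.Str.isIn "if (count" f || (PySem.Str.isIn "guard" f ||
      (PySem.Str.isIn "validate" f || PySem.Str.isIn "check" f))))) = F2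
  generalize (PySem.Str.isIn "i + 1 < arr.size()" f || (PySem.Str.isIn "arr.size() - 1" f ||
    (PySem.Str.isIn "bound" f || PySem.Str.isIn "index" f))) = F3
  generalize (PySem.Str.isIn "arr.empty()" f || (PySem.Str.isIn "if(arr.empty())" f ||
    (PySem.Str.isIn "if (arr.empty())" f || PySem.Str.isIn "size() == 0" f))) = F4
  generalize (PySem.Str.isIn "const vector<int>&" f || (PySem.Str.isIn "const reference" f ||
    PySem.Str.isIn "reference" f)) = F5
  simp only [Bool.or_comm, Bool.or_left_comm, Bool.or_assoc]
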